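-- pv_equiv track=rewrite | github.com/SiddharthShah30/puzzle-solver | linkedin_queens_solver/ui.py | _normalize_region_ids
-- ===== SOURCE A (Python) =====
-- from typing import List, Optional, Set, Tuple
--
-- def _normalize_region_ids(regions: List[List[int]]) -> List[List[int]]:
--     remap = {}
--     next_id = 0
--     normalized: List[List[int]] = []
--     for row in regions:
--         out_row = []
--         for rid in row:
--             if rid not in remap:
--                 remap[rid] = next_id
--                 next_id += 1
--             out_row.append(remap[rid])
--         normalized.append(out_row)
--     return normalized
-- ===== SOURCE B (Python) =====
-- from typing import List
--
--
-- def _normalize_region_ids(regions: List[List[int]]) -> List[List[int]]: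
--     # Rank-by-prefix: an id's normalized value is the number of distinct ids
--     # occurring strictly before its first occurrence in the flattened grid.
--     # No remap dict and no incremental counter are maintained at all.
--     flat = [rid for row in regions for rid in row]
--     return [[len(set(flat[:flat.index(rid)])) for rid in row] for row in regions]
-- ===== Notes on version B (the rewrite author's own statement) =====
-- stated objective: alternative
-- what changed: Drops A's incrementally-grown remap dict and next_id counter entirely: B flattens the grid once and computes each id's normalized value directly as the number of distinct ids in the prefix before that id's first occurrence (len(set(flat[:flat.index(rid)]))), a rank-by-prefix formulation.
import Mathlib
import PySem

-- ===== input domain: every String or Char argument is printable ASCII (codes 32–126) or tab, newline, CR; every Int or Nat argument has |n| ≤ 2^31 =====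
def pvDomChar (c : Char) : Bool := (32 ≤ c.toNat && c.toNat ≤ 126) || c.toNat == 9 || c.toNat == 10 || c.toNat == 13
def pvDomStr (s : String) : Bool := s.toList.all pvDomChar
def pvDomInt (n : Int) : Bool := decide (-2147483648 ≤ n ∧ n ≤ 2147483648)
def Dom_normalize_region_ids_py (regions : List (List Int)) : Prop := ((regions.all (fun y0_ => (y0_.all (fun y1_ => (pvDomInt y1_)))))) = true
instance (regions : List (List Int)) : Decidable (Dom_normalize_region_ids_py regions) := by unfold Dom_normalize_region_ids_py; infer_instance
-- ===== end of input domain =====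

-- B drops A's incrementally-grown remap dict/counter: it flattens the grid and computes
-- each id's value as the number of distinct ids before its first occurrence (rank-by-prefix).


-- ===== PORT A =====
-- state: (remap, next_id, normalized); 'remap[rid]' after the guard is total, ported as getD.
def normalize_region_ids_py (regions : List (List Int)) : List (List Int) :=
  (regions.foldl (fun st row =>
      let inner := row.foldl (fun st2 rid =>
          let st3 := if st2.1.contains rid = false
                     then (st2.1.insert rid st2.2.1, st2.2.1 + 1)
                     else (st2.1, st2.2.1)
          (st3.1, st3.2, st2.2.2 ++ [st3.1.getD rid 0]))
        (st.1, st.2.1, ([] : List Int))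
      (inner.1, inner.2.1, st.2.2 ++ [inner.2.2]))
    ((PySem.Dict.empty : PySem.Dict Int Int), (0 : Int), ([] : List (List Int)))).2.2

-- ===== PORT B =====
-- 'flat.index(rid)' is always a hit (rid comes from flat), ported as index? … .getD 0.
def normalize_region_ids_py_alt (regions : List (List Int)) : List (List Int) :=
  let flat := regions.flatMap (fun row => row)
  regions.map (fun row => row.map (fun rid =>
    PySem.Set.len (PySem.Set.ofList
      (PySem.List.slice flat none (some (((PySem.List.index? flat rid).getD 0 : Nat) : Int))))))

-- ===== PRECONDITION & SPEC =====
def Spec_normalize_region_ids_py (regions : List (List Int)) (out : List (List Int)) : Prop := out = normalize_region_ids_py_alt regions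
instance (regions : List (List Int)) (out : List (List Int)) : Decidable (Spec_normalize_region_ids_py regions out) := by unfold Spec_normalize_region_ids_py; infer_instance

-- ===== CLAIM (what is proved, stated in full; the proofs are below) =====
def Claim_equal_normalize_region_ids_py : Prop := ∀ (regions : List (List Int)), Dom_normalize_region_ids_py regions → Spec_normalize_region_ids_py regions (normalize_region_ids_py regions)

-- ===== LEMMAS AND PROOFS =====

-- the dict mapping each element of dl to its index, in dl's order
def idxDict (dl : List Int) : PySem.Dict Int Int :=
  PySem.Dict.mk (dl.zipIdx.map (fun p => (p.1, (p.2 : Int))))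

-- the index of rid in dl, as an Int (0 if absent)
def idxIn (dl : List Int) (rid : Int) : Int :=
  (((PySem.List.index? dl rid).getD 0 : Nat) : Int)

theorem keys_idxDict (dl : List Int) : (idxDict dl).keys = dl := by
  simp [idxDict, PySem.Dict.keys, List.map_map]
  exact List.zipIdx_map_fst 0 dl

theorem contains_idxDict (dl : List Int) (rid : Int) :
    (idxDict dl).contains rid = decide (rid ∈ dl) := by
  rw [PySem.Dict.contains_eq_decide_mem_keys, keys_idxDict]

theorem foldl_add_prefix (r : List Int) : ∀ (s : PySem.Set Int),
    ∃ t, r.foldl PySem.Set.add s = s ++ t := by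
  induction r with
  | nil => exact fun s => ⟨[], by simp⟩
  | cons x r ih =>
    intro s
    simp only [List.foldl_cons, PySem.Set.add]
    by_cases h : s.contains x = true
    · rw [if_pos h]; exact ih s
    · rw [if_neg h]
      obtain ⟨t, ht⟩ := ih (s ++ [x])
      exact ⟨x :: t, by simp [ht]⟩

theorem dedup_append_prefix (l r : List Int) :
    ∃ t, PySem.List.dedup (l ++ r) = PySem.List.dedup l ++ t := by
  simpa [PySem.Set.ofList_eq_foldl] using foldl_add_prefix r (PySem.List.dedup l)

theorem idx_stable (l r : List Int) (rid : Int) (h : rid ∈ l) :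
    idxIn (PySem.List.dedup (l ++ r)) rid = idxIn (PySem.List.dedup l) rid := by
  obtain ⟨t, ht⟩ := dedup_append_prefix l r
  rw [idxIn, idxIn, ht, PySem.List.index?_append_of_mem t ((PySem.List.mem_dedup _ _).2 h)]

theorem dedup_append_singleton (l : List Int) (rid : Int) :
    PySem.List.dedup (l ++ [rid]) =
      if rid ∈ l then PySem.List.dedup l else PySem.List.dedup l ++ [rid] := by
  have : PySem.List.dedup (l ++ [rid]) = PySem.Set.add (PySem.List.dedup l) rid := by
    simp [PySem.Set.ofList_eq_foldl]
  rw [this, PySem.Set.add]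
  by_cases h : rid ∈ l
  · simp [h, PySem.Set.contains]
  · simp [h, PySem.Set.contains]

theorem getD_idxDict_of_mem (dl : List Int) (rid : Int) (hm : rid ∈ dl) (hnd : dl.Nodup) :
    (idxDict dl).getD rid 0 = idxIn dl rid := by
  obtain ⟨k, hk⟩ := Option.isSome_iff_exists.1 ((PySem.List.index?_isSome_iff _ _).2 hm)
  obtain ⟨hklt, hgev, _⟩ := PySem.List.getElem_of_index?_eq_some hk
  have hmem : (rid, (k : Int)) ∈ (idxDict dl).items := by
    simp only [idxDict]
    exact List.mem_map.2 ⟨(rid, k), by simp [List.mem_zipIdx_iff_getElem?, hgev ▸ List.getElem?_eq_getElem hklt], rfl⟩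
  rw [PySem.Dict.getD_of_mem_items _ hmem (by rw [keys_idxDict]; exact hnd), idxIn, hk]
  rfl

theorem insert_idxDict_fresh (dl : List Int) (rid : Int) (h : rid ∉ dl) :
    (idxDict dl).insert rid (dl.length : Int) = idxDict (dl ++ [rid]) := by
  apply PySem.Dict.ext
  rw [PySem.Dict.items_insert_of_not_contains _ _ (by simp [contains_idxDict, h])]
  simp [idxDict, List.zipIdx_append]

-- A's inner-loop body and row-loop body, named for the proofs (defeq to the port's lambdas)
def aStep (st2 : PySem.Dict Int Int × Int × List Int) (rid : Int) :
    PySem.Dict Int Int × Int × List Int :=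
  let st3 := if st2.1.contains rid = false
             then (st2.1.insert rid st2.2.1, st2.2.1 + 1)
             else (st2.1, st2.2.1)
  (st3.1, st3.2, st2.2.2 ++ [st3.1.getD rid 0])

def aRow (st : PySem.Dict Int Int × Int × List (List Int)) (row : List Int) :
    PySem.Dict Int Int × Int × List (List Int) :=
  let inner := row.foldl aStep (st.1, st.2.1, ([] : List Int))
  (inner.1, inner.2.1, st.2.2 ++ [inner.2.2])

theorem step_app (seen out : List Int) (rid : Int) :
    aStep (idxDict (PySem.List.dedup seen), ((PySem.List.dedup seen).length : Int), out) rid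
    = (idxDict (PySem.List.dedup (seen ++ [rid])),
       ((PySem.List.dedup (seen ++ [rid])).length : Int),
       out ++ [idxIn (PySem.List.dedup (seen ++ [rid])) rid]) := by
  have hded := dedup_append_singleton seen rid
  unfold aStep
  by_cases h : rid ∈ seen
  · rw [if_pos h] at hded
    have hc : (idxDict (PySem.List.dedup seen)).contains rid = true := by
      simp [contains_idxDict, h]
    have hg := getD_idxDict_of_mem (PySem.List.dedup seen) rid
      ((PySem.List.mem_dedup _ _).2 h) (PySem.List.nodup_dedup seen)
    simp only [PySem.List.dedup_eq_ofList] at hg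
    simp only [hc, hded, Bool.true_eq_false, if_false]
    simp [hg]
  · rw [if_neg h] at hded
    have hc : (idxDict (PySem.List.dedup seen)).contains rid = false := by
      simp [contains_idxDict, h]
    have hfresh : rid ∉ PySem.List.dedup seen := fun hc' => h ((PySem.List.mem_dedup _ _).1 hc')
    have hins := insert_idxDict_fresh (PySem.List.dedup seen) rid hfresh
    have hmem' : rid ∈ PySem.List.dedup (seen ++ [rid]) := by rw [hded]; simp
    have hg := getD_idxDict_of_mem (PySem.List.dedup (seen ++ [rid])) rid hmem'
      (PySem.List.nodup_dedup (seen ++ [rid]))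
    rw [hded] at hg
    simp only [PySem.List.dedup_eq_ofList] at hg
    simp only [hc, hins, hded]
    refine Prod.ext rfl (Prod.ext ?_ ?_)
    · simp
    · simp [hg]

theorem inner_eq (row : List Int) : ∀ (seen out : List Int),
    row.foldl aStep
      (idxDict (PySem.List.dedup seen), ((PySem.List.dedup seen).length : Int), out)
    = (idxDict (PySem.List.dedup (seen ++ row)),
       ((PySem.List.dedup (seen ++ row)).length : Int),
       out ++ row.map (fun rid => idxIn (PySem.List.dedup (seen ++ row)) rid)) := by
  induction row with
  | nil => intro seen out; simp
  | cons rid rest ih =>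
    intro seen out
    have hassoc : (seen ++ [rid]) ++ rest = seen ++ rid :: rest := by simp
    rw [List.foldl_cons, step_app, ih (seen ++ [rid]), hassoc]
    have hstab := idx_stable (seen ++ [rid]) rest rid (by simp)
    rw [hassoc] at hstab
    simp only [PySem.List.dedup_eq_ofList] at hstab
    simp [← hstab]

theorem row_app (seen : List Int) (acc : List (List Int)) (row : List Int) :
    aRow (idxDict (PySem.List.dedup seen), ((PySem.List.dedup seen).length : Int), acc) row
    = (idxDict (PySem.List.dedup (seen ++ row)),
       ((PySem.List.dedup (seen ++ row)).length : Int),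
       acc ++ [row.map (fun rid => idxIn (PySem.List.dedup (seen ++ row)) rid)]) := by
  unfold aRow
  rw [show ((idxDict (PySem.List.dedup seen), ((PySem.List.dedup seen).length : Int), acc).1,
        (idxDict (PySem.List.dedup seen), ((PySem.List.dedup seen).length : Int), acc).2.1,
        ([] : List Int))
      = (idxDict (PySem.List.dedup seen), ((PySem.List.dedup seen).length : Int),
        ([] : List Int)) from rfl,
     inner_eq row seen []]
  simp

theorem outer_eq (rs : List (List Int)) : ∀ (seen : List Int) (acc : List (List Int)),
    rs.foldl aRow
      (idxDict (PySem.List.dedup seen), ((PySem.List.dedup seen).length : Int), acc)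
    = (idxDict (PySem.List.dedup (seen ++ rs.flatMap (fun row => row))),
       ((PySem.List.dedup (seen ++ rs.flatMap (fun row => row))).length : Int),
       acc ++ rs.map (fun row => row.map
         (fun rid => idxIn (PySem.List.dedup (seen ++ rs.flatMap (fun row => row))) rid))) := by
  induction rs with
  | nil => intro seen acc; simp
  | cons row rest ih =>
    intro seen acc
    have hassoc : (seen ++ row) ++ rest.flatMap (fun row => row)
        = seen ++ (row :: rest).flatMap (fun row => row) := by simp
    rw [List.foldl_cons, row_app, ih (seen ++ row), hassoc]
    have hrow : (row.map (fun rid => idxIn (PySem.List.dedup (seen ++ row)) rid))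
        = row.map (fun rid =>
            idxIn (PySem.List.dedup (seen ++ (row :: rest).flatMap (fun row => row))) rid) := by
      refine List.map_congr_left (fun rid hmem => ?_)
      have hst := idx_stable (seen ++ row) (rest.flatMap (fun row => row)) rid (by simp [hmem])
      rw [hassoc] at hst
      exact hst.symm
    rw [hrow]
    simp

theorem a_closed (regions : List (List Int)) :
    normalize_region_ids_py regions
      = regions.map (fun row => row.map
          (fun rid => idxIn (PySem.List.dedup (regions.flatMap (fun row => row))) rid)) := by
  have h := outer_eq regions [] []
  simp only [List.nil_append] at h
  show (regions.foldl aRow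
      ((PySem.Dict.empty : PySem.Dict Int Int), (0 : Int), ([] : List (List Int)))).2.2 = _
  rw [show ((PySem.Dict.empty : PySem.Dict Int Int), (0 : Int), ([] : List (List Int)))
      = (idxDict (PySem.List.dedup ([] : List Int)),
         ((PySem.List.dedup ([] : List Int)).length : Int), ([] : List (List Int))) from rfl, h]

-- B's per-id value: distinct ids before rid's first occurrence = rid's index in the dedup list
theorem rank_prefix (flat : List Int) (rid : Int) (h : rid ∈ flat) :
    PySem.Set.len (PySem.Set.ofList
      (PySem.List.slice flat none (some (((PySem.List.index? flat rid).getD 0 : Nat) : Int))))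
    = idxIn (PySem.List.dedup flat) rid := by
  obtain ⟨i, hi⟩ := Option.isSome_iff_exists.1 ((PySem.List.index?_isSome_iff _ _).2 h)
  obtain ⟨p, s, hps, hlen, hnp⟩ := (PySem.List.index?_eq_some_iff _ _ _).1 hi
  rw [hi]
  simp only [Option.getD_some]
  rw [PySem.List.slice_to_natCast]
  have htake : flat.take i = p := by
    subst hps; subst hlen; simp
  have h1 : PySem.List.dedup (p ++ [rid]) = PySem.List.dedup p ++ [rid] := by
    rw [dedup_append_singleton]; simp [hnp]
  obtain ⟨t, ht⟩ := dedup_append_prefix (p ++ [rid]) s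
  have hflat : p ++ [rid] ++ s = flat := by simp [hps]
  have hdd : PySem.List.dedup flat = PySem.List.dedup p ++ rid :: t := by
    rw [← hflat, ht, h1]; simp
  have hnd : rid ∉ PySem.List.dedup p := fun hc => hnp ((PySem.List.mem_dedup _ _).1 hc)
  have hidx : PySem.List.index? (PySem.List.dedup flat) rid
      = some (PySem.List.dedup p).length := by
    rw [hdd]
    exact (PySem.List.index?_eq_some_iff _ _ _).2 ⟨PySem.List.dedup p, t, rfl, rfl, hnd⟩
  rw [idxIn]
  simp only [PySem.List.dedup_eq_ofList] at hidx ⊢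
  rw [hidx, htake]
  simp [PySem.Set.len]

theorem b_closed (regions : List (List Int)) :
    normalize_region_ids_py_alt regions
      = regions.map (fun row => row.map
          (fun rid => idxIn (PySem.List.dedup (regions.flatMap (fun row => row))) rid)) := by
  simp only [normalize_region_ids_py_alt]
  refine List.map_congr_left (fun row hrow => List.map_congr_left (fun rid hrid => ?_))
  exact rank_prefix _ rid (List.mem_flatMap.2 ⟨row, hrow, hrid⟩)

-- ===== VERDICT (by name: the statement is the Claim_ definition above) =====
theorem normalize_region_ids_py_spec : Claim_equal_normalize_region_ids_py := by
  intro regions _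
  unfold Spec_normalize_region_ids_py
  rw [a_closed, b_closed]
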